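-- pv_equiv track=rewrite | github.com/Charpup/game-localization-mvr | scripts/run_ui_art_residual_triage.py | merge_repaired_rows
-- ===== SOURCE A (Python) =====
-- from typing import Any, Dict, Iterable, List
--
-- def merge_repaired_rows(base_rows: List[Dict[str, str]], patched_rows: List[Dict[str, str]]) -> List[Dict[str, str]]:
--     patched_map = {str(row.get("string_id") or ""): row for row in patched_rows}
--     merged: List[Dict[str, str]] = []
--     for row in base_rows:
--         sid = str(row.get("string_id") or "")
--         patch = patched_map.get(sid)
--         if not patch:
--             merged.append(dict(row))
--             continue
--         combined = dict(row)
--         for key, value in patch.items():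
--             if value == "" and key not in {"target_text", "target", "target_ru"}:
--                 continue
--             combined[key] = value
--         combined["current_target_text"] = str(patch.get("target_text") or patch.get("target_ru") or "")
--         combined["residual_merge_status"] = str(patch.get("translate_status") or "patched")
--         merged.append(combined)
--     return merged
-- ===== SOURCE B (Python) =====
-- from typing import Dict, List, Optional
--
-- _KEEP = ("target_text", "target", "target_ru")
--
--
-- def _sid(d: Dict[str, str]) -> str:
--     return str(d.get("string_id") or "")
--
--
-- def _patch_for(patched_rows: List[Dict[str, str]], sid: str) -> Optional[Dict[str, str]]:
--     # last patched row with this normalized string_id wins (dict semantics)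
--     for cand in reversed(patched_rows):
--         if _sid(cand) == sid:
--             return cand
--     return None
--
--
-- def _merge_row(row: Dict[str, str], patch: Optional[Dict[str, str]]) -> Dict[str, str]:
--     if not patch:
--         return dict(row)
--     combined = dict(row)
--     combined.update((k, v) for k, v in patch.items() if v != "" or k in _KEEP)
--     combined["current_target_text"] = patch.get("target_text") or patch.get("target_ru") or ""
--     combined["residual_merge_status"] = patch.get("translate_status") or "patched"
--     return combined
--
--
-- def merge_repaired_rows(base_rows: List[Dict[str, str]], patched_rows: List[Dict[str, str]]) -> List[Dict[str, str]]:
--     return [_merge_row(row, _patch_for(patched_rows, _sid(row))) for row in base_rows]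
-- ===== Notes on version B (the rewrite author's own statement) =====
-- stated objective: alternative
-- what changed: B drops A's prebuilt patched_map dict: each base row locates its patch by a reverse linear scan of patched_rows (first hit of the reversal = dict's last-writer-wins), applies the patch via a filtered dict update instead of a skip-continue loop, and builds the output with a single list comprehension instead of an accumulator loop.
import Mathlib
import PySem

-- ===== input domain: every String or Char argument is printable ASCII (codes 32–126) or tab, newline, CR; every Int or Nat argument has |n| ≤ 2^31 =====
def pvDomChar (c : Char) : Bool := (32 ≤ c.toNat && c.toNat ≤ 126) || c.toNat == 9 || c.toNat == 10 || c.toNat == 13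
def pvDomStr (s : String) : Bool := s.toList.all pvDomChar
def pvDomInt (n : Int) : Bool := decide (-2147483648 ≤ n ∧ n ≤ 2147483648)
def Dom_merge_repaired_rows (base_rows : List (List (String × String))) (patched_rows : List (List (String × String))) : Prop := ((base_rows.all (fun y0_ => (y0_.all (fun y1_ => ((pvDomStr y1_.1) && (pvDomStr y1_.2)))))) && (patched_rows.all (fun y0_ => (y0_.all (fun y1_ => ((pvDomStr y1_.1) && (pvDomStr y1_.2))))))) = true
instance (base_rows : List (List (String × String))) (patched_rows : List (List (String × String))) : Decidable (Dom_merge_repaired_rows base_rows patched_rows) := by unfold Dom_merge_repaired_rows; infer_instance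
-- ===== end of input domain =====

-- B drops A's prebuilt patched_map: each base row finds its patch by a reverse linear scan of
-- patched_rows (last matching normalized string_id wins, as in the dict), and the output is a
-- single list comprehension; objective: alternative decomposition, not faster.

-- ===== PORT A =====
-- str(d.get("string_id") or "") : missing key and "" both normalize to ""
def pvSidA (row : List (String × String)) : String :=
  (PySem.Dict.mk row).getD "string_id" ""

-- 'a or b' on strings: first operand if truthy (nonempty), else second
def pvOrA (a b : String) : String := if a = "" then b else a

def pvCombineA (row patch : List (String × String)) : List (String × String) :=
  let combined := patch.foldl
    (fun c kv =>
      if kv.2 = "" ∧ ¬ (kv.1 = "target_text" ∨ kv.1 = "target" ∨ kv.1 = "target_ru") then c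
      else c.insert kv.1 kv.2)
    (PySem.Dict.mk row)
  let p := PySem.Dict.mk patch
  let combined := combined.insert "current_target_text"
    (pvOrA (p.getD "target_text" "") (pvOrA (p.getD "target_ru" "") ""))
  let combined := combined.insert "residual_merge_status"
    (pvOrA (p.getD "translate_status" "") "patched")
  combined.items

def merge_repaired_rows (base_rows : List (List (String × String))) (patched_rows : List (List (String × String))) : List (List (String × String)) :=
  let patched_map := patched_rows.foldl
    (fun m row => m.insert (pvSidA row) row) PySem.Dict.empty
  base_rows.foldl
    (fun merged row =>
      match patched_map.get? (pvSidA row) with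
      | none => merged ++ [row]                         -- patch is None : falsy
      | some patch =>
        if patch = [] then merged ++ [row]              -- patch is {} : falsy
        else merged ++ [pvCombineA row patch])
    []

-- ===== PORT B =====
def pvSidB (d : List (String × String)) : String :=
  (PySem.Dict.mk d).getD "string_id" ""

def pvOrB (a b : String) : String := if a = "" then b else a

-- last patched row with this normalized string_id wins: first hit of the reversed scan
def pvPatchForB (patched_rows : List (List (String × String))) (sid : String) : Option (List (String × String)) :=
  patched_rows.reverse.find? (fun cand => pvSidB cand == sid)

def pvMergeRowB (row : List (String × String)) (patch? : Option (List (String × String))) : List (String × String) :=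
  match patch? with
  | none => row
  | some patch =>
    if patch = [] then row
    else
      let p := PySem.Dict.mk patch
      let combined := (PySem.Dict.mk row).update
        (patch.filter (fun kv => kv.2 ≠ "" ∨ kv.1 ∈ ["target_text", "target", "target_ru"]))
      let combined := combined.insert "current_target_text"
        (pvOrB (p.getD "target_text" "") (pvOrB (p.getD "target_ru" "") ""))
      let combined := combined.insert "residual_merge_status"
        (pvOrB (p.getD "translate_status" "") "patched")
      combined.items

def merge_repaired_rows_alt (base_rows : List (List (String × String))) (patched_rows : List (List (String × String))) : List (List (String × String)) :=
  base_rows.map (fun row => pvMergeRowB row (pvPatchForB patched_rows (pvSidB row)))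

-- ===== PRECONDITION & SPEC =====
def Spec_merge_repaired_rows (base_rows : List (List (String × String))) (patched_rows : List (List (String × String))) (out : List (List (String × String))) : Prop := out = merge_repaired_rows_alt base_rows patched_rows
instance (base_rows : List (List (String × String))) (patched_rows : List (List (String × String))) (out : List (List (String × String))) : Decidable (Spec_merge_repaired_rows base_rows patched_rows out) := by unfold Spec_merge_repaired_rows; infer_instance

-- ===== CLAIM (what is proved, stated in full; the proofs are below) =====
def Claim_equal_merge_repaired_rows : Prop := ∀ (base_rows : List (List (String × String))) (patched_rows : List (List (String × String))), Dom_merge_repaired_rows base_rows patched_rows → Spec_merge_repaired_rows base_rows patched_rows (merge_repaired_rows base_rows patched_rows)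

-- ===== LEMMAS AND PROOFS =====

-- pvSidA and pvSidB are the same normalization
theorem pvSid_eq (row : List (String × String)) : pvSidA row = pvSidB row := rfl

-- the dict built by A's comprehension looks up the same row B's reversed scan finds
theorem get?_foldl_insert_eq_find (l : List (List (String × String)))
    (m : PySem.Dict String (List (String × String))) (sid : String) :
    (l.foldl (fun m row => m.insert (pvSidA row) row) m).get? sid
      = (match l.reverse.find? (fun c => pvSidB c == sid) with
         | some c => some c
         | none => m.get? sid) := by
  induction l generalizing m with
  | nil => simp
  | cons r rest ih =>
    simp only [List.foldl_cons, List.reverse_cons, List.find?_append]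
    rw [ih]
    cases hf : rest.reverse.find? (fun c => pvSidB c == sid) with
    | some c => simp
    | none =>
      simp only [List.find?_singleton]
      by_cases h : pvSidB r == sid
      · have hs : sid = pvSidA r := by
          rw [pvSid_eq]; exact (eq_of_beq h).symm
        simp [hs, pvSid_eq, PySem.Dict.get?_insert_self]
      · have hne : sid ≠ pvSidA r := by
          rw [pvSid_eq]; intro he; exact h (by simp [he])
        simp [h, PySem.Dict.get?_insert, hne]

-- A's skip-or-insert loop over the patch equals B's update with the filtered pairs
theorem foldl_skip_eq_update (patch : List (String × String))
    (d : PySem.Dict String String) :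
    patch.foldl
      (fun c kv =>
        if kv.2 = "" ∧ ¬ (kv.1 = "target_text" ∨ kv.1 = "target" ∨ kv.1 = "target_ru") then c
        else c.insert kv.1 kv.2) d
      = d.update (patch.filter (fun kv => kv.2 ≠ "" ∨ kv.1 ∈ ["target_text", "target", "target_ru"])) := by
  induction patch generalizing d with
  | nil => rfl
  | cons kv rest ih =>
    simp only [List.foldl_cons, List.filter_cons]
    by_cases h : kv.2 = "" ∧ ¬ (kv.1 = "target_text" ∨ kv.1 = "target" ∨ kv.1 = "target_ru")
    · have hb : (decide (kv.2 ≠ "" ∨ kv.1 ∈ ["target_text", "target", "target_ru"])) = false := by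
        simp only [List.mem_cons, List.not_mem_nil, or_false]
        simp [h.1, fun c => h.2 c]
      rw [if_pos h, ih, hb]
      simp
    · have hb : (decide (kv.2 ≠ "" ∨ kv.1 ∈ ["target_text", "target", "target_ru"])) = true := by
        simp only [List.mem_cons, List.not_mem_nil, or_false, decide_eq_true_eq]
        by_cases h2 : kv.2 = ""
        · right
          by_contra hk
          exact h ⟨h2, by tauto⟩
        · exact Or.inl h2
      rw [if_neg h, hb, ih]
      rfl

-- per-row agreement
theorem row_eq (patched_rows : List (List (String × String))) (row : List (String × String)) :
    (match (patched_rows.foldl (fun m r => m.insert (pvSidA r) r) PySem.Dict.empty).get? (pvSidA row) with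
     | none => row
     | some patch => if patch = [] then row else pvCombineA row patch)
      = pvMergeRowB row (pvPatchForB patched_rows (pvSidB row)) := by
  rw [get?_foldl_insert_eq_find, pvSid_eq]
  unfold pvPatchForB
  cases hf : patched_rows.reverse.find? (fun c => pvSidB c == pvSidB row) with
  | none => simp [pvMergeRowB, PySem.Dict.get?, PySem.Dict.empty]
  | some patch =>
    simp only
    by_cases hp : patch = []
    · simp [hp, pvMergeRowB]
    · simp only [pvMergeRowB, if_neg hp]
      unfold pvCombineA
      rw [foldl_skip_eq_update]
      rfl

-- ===== VERDICT (by name: the statement is the Claim_ definition above) =====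
theorem merge_repaired_rows_spec : Claim_equal_merge_repaired_rows := by
  intro base patched _
  unfold Spec_merge_repaired_rows merge_repaired_rows merge_repaired_rows_alt
  simp only
  rw [show (fun (merged : List (List (String × String))) row =>
        match (patched.foldl (fun m r => m.insert (pvSidA r) r) PySem.Dict.empty).get? (pvSidA row) with
        | none => merged ++ [row]
        | some patch => if patch = [] then merged ++ [row] else merged ++ [pvCombineA row patch])
      = (fun merged row => merged ++ [pvMergeRowB row (pvPatchForB patched (pvSidB row))]) from ?_]
  · exact (PySem.List.foldl_append_singleton_eq_map _ _ _).trans (by simp)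
  · funext merged row
    rw [← row_eq]
    cases (patched.foldl (fun m r => m.insert (pvSidA r) r) PySem.Dict.empty).get? (pvSidA row) with
    | none => rfl
    | some p => by_cases hp : p = [] <;> simp [hp]
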